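-- pv_equiv track=rewrite | github.com/ericmerle3789/Collatz-Junction-Theorem | scripts/research/r24_multiplier_coset.py | compute_N0_prime_direct
-- ===== SOURCE A (Python) =====
-- from math import comb, gcd, log, log2, ceil, floor, sqrt, pi, exp
--
-- def compute_S(k):
--     """S = ceil(k * log2(3)), exact via integer comparison."""
--     S = ceil(k * log2(3))
--     while (1 << S) <= 3**k:
--         S += 1
--     while S > 0 and (1 << (S - 1)) > 3**k:
--         S -= 1
--     return S
--
-- def compute_d(k):
--     """d(k) = 2^S(k) - 3^k."""
--     S = compute_S(k)
--     return (1 << S) - 3**k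
--
-- def extended_gcd(a, b):
--     if a == 0:
--         return b, 0, 1
--     g, x, y = extended_gcd(b % a, a)
--     return g, y - (b // a) * x, x
--
-- def modinv(a, m):
--     if m == 1:
--         return 0
--     g, x, _ = extended_gcd(a % m, m)
--     if g != 1:
--         return None
--     return x % m
--
-- def compute_g(k_or_d, is_d=False):
--     """g = 2 * 3^{-1} mod d."""
--     d_val = k_or_d if is_d else compute_d(k_or_d)
--     inv3 = modinv(3, d_val)
--     if inv3 is None:
--         return None
--     return (2 * inv3) % d_val
--
-- def compute_PB(B, g, mod):
--     """P_B(g) = sum_{j=0}^{k-1} g^j * 2^{B_j} mod mod."""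
--     s = 0
--     g_pow = 1
--     for bj in B:
--         s = (s + g_pow * pow(2, bj, mod)) % mod
--         g_pow = (g_pow * g) % mod
--     return s
--
-- def enum_nondecreasing_B(k, max_B, limit=500000):
--     """Generate all nondecreasing B sequences with B_0=0, B_j <= max_B."""
--     count = [0]
--
--     def gen(pos, min_val, current):
--         if count[0] >= limit:
--             return
--         if pos == k:
--             count[0] += 1
--             yield tuple(current)
--             return
--         for v in range(min_val, max_B + 1):
--             current.append(v)
--             yield from gen(pos + 1, v, current)
--             current.pop()
--
--     # B_0 = 0 always (first position in A-vector is 0)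
--     return gen(1, 0, [0])
--
-- def compute_N0_prime_direct(k):
--     """Compute N_0(d(k)) by direct enumeration for small k."""
--     d = compute_d(k)
--     S = compute_S(k)
--     max_B = S - k
--     g = compute_g(k)
--     if g is None:
--         return -1
--
--     C_val = comb(S - 1, k - 1)
--     if C_val > 500000:
--         return -2
--
--     count = 0
--     for B in enum_nondecreasing_B(k, max_B, limit=500000):
--         if compute_PB(B, g, d) == 0:
--             count += 1
--     return count
-- ===== SOURCE B (Python) =====
-- from math import comb
--
--
-- def compute_N0_prime_direct(k):
--     """Compute N_0(d(k)) by residue-distribution dynamic programming (no sequence enumeration)."""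
--     p3 = 3 ** k
--     S = p3.bit_length()          # exact: 2**(S-1) <= 3**k < 2**S
--     d = (1 << S) - p3
--     max_B = S - k
--     g = (2 * pow(3, -1, d)) % d  # 3 is always invertible mod d (d is never a multiple of 3)
--     if comb(S - 1, k - 1) > 500000:
--         return -2
--     # dist[v] : residue -> number of nondecreasing suffixes (B_pos..B_{k-1}) with
--     # values in [v, max_B] and residue sum_{j>=pos} g^j * 2^{B_j} mod d.
--     # Start with suffix length 0 (position k): the empty suffix, residue 0.
--     dist = {v: {0: 1} for v in range(max_B + 2)}
--     for pos in range(k - 1, 0, -1):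
--         new = {max_B + 1: {}}
--         for v in range(max_B, -1, -1):
--             cv = pow(g, pos, d) * pow(2, v, d) % d
--             cur = dict(new[v + 1])
--             for r, c in dist[v].items():
--                 r2 = (r + cv) % d
--                 cur[r2] = cur.get(r2, 0) + c
--             new[v] = cur
--         dist = new
--     # B_0 = 0 contributes g^0 * 2^0 = 1; count residues with 1 + r ≡ 0 (mod d)
--     return dist[0].get((-1) % d, 0)
-- ===== Notes on version B (the rewrite author's own statement) =====
-- stated objective: alternative
-- what changed: Replaces A's per-sequence enumeration (recursive generator yielding every nondecreasing B-tuple, each re-scanned by compute_PB) with a dynamic program over residue-count dictionaries: counters mapping residue mod d to the number of nondecreasing suffixes are merged value-by-value and position-by-position, so no B-sequence is ever materialised; S is computed by bit_length and the inverse by pow(3,-1,d) instead of float seed-and-correct loops plus a hand-written extended Euclid.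
import Mathlib
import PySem

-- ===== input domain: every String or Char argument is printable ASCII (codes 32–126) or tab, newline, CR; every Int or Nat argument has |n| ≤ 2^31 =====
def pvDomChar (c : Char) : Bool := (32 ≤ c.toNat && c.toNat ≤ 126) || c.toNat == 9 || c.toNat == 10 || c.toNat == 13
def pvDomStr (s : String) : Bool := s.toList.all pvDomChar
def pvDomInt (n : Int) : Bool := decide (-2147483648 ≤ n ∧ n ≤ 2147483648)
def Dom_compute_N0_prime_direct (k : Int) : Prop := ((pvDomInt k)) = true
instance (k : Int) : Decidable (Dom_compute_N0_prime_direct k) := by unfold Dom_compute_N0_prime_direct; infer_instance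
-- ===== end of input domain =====

-- B replaces A's recursive generator enumeration (one compute_PB scan per sequence) with a
-- dynamic program over residue-count dictionaries that never materialises a B-sequence;
-- equivalence is proved for every k ≥ 1 (A raises otherwise).

-- ===== PORT A =====

-- compute_S: the float seed `ceil(k * log2(3))` is not portable; the two correction loops
-- make the result independent of the seed (any seed ≤ the answer climbs to it, any seed above
-- descends to it), so we seed 0; exact for every k ≥ 0.  `1 << S` is 2^S (S stays ≥ 0 here).
def pvA_S_up : Nat → Int → Int → Int
  | 0, S, _ => S
  | f + 1, S, p => if 2 ^ S.toNat ≤ p then pvA_S_up f (S + 1) p else S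

def pvA_S_down : Nat → Int → Int → Int
  | 0, S, _ => S
  | f + 1, S, p => if 0 < S ∧ p < 2 ^ (S - 1).toNat then pvA_S_down f (S - 1) p else S

def pvA_computeS (k : Int) : Int :=
  let p : Int := 3 ^ k.toNat          -- 3**k; k ≥ 0 under Pre_
  let S := pvA_S_up (2 * k.toNat + 4) 0 p   -- fuel ample: the answer is ≤ 2k+2
  pvA_S_down (S.toNat + 1) S p

def pvA_computeD (k : Int) : Int := 2 ^ (pvA_computeS k).toNat - 3 ^ k.toNat

-- extended_gcd: fuel = |a| + 1 always suffices (|first argument| strictly decreases)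
def pvA_extgcd : Nat → Int → Int → Int × Int × Int
  | 0, _, _ => (0, 0, 0)              -- fuel guard, never reached
  | f + 1, a, b =>
    if a = 0 then (b, 0, 1)
    else
      let r := pvA_extgcd f (PySem.Int.mod b a) a
      (r.1, r.2.2 - PySem.Int.floordiv b a * r.2.1, r.2.1)

def pvA_extended_gcd (a b : Int) : Int × Int × Int := pvA_extgcd (a.natAbs + 1) a b

def pvA_modinv (a m : Int) : Option Int :=
  if m = 1 then some 0
  else
    let r := pvA_extended_gcd (PySem.Int.mod a m) m
    if r.1 ≠ 1 then none else some (PySem.Int.mod r.2.1 m)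

def pvA_computeG (k : Int) : Option Int :=
  let d := pvA_computeD k
  match pvA_modinv 3 d with
  | none => none
  | some inv3 => some (PySem.Int.mod (2 * inv3) d)

-- compute_PB: running pair (s, g_pow); B_j ≥ 0 in every call made here
def pvA_PB (B : List Int) (g m : Int) : Int :=
  (B.foldl
    (fun (sp : Int × Int) bj =>
      (PySem.Int.mod (sp.1 + sp.2 * PySem.Int.powMod 2 bj.toNat m) m,
       PySem.Int.mod (sp.2 * g) m))
    (0, 1)).1

-- gen of enum_nondecreasing_B, with the count/limit cutoff threaded through;
-- fuel bounds the recursion depth (k - pos), ample at k.toNat + 1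
def pvA_gen (fuel : Nat) (pos k minVal maxB : Int) (current : List Int) (cnt limit : Int) :
    List (List Int) × Int :=
  if limit ≤ cnt then ([], cnt)
  else if pos = k then ([current], cnt + 1)
  else
    match fuel with
    | 0 => ([], cnt)                  -- fuel guard, never reached
    | f + 1 =>
      (PySem.List.pyRange minVal (maxB + 1) 1).foldl
        (fun acc v =>
          let r := pvA_gen f (pos + 1) k v maxB (current ++ [v]) acc.2 limit
          (acc.1 ++ r.1, r.2))
        ([], cnt)

def compute_N0_prime_direct (k : Int) : Int :=
  let d := pvA_computeD k
  let S := pvA_computeS k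
  let max_B := S - k
  match pvA_computeG k with
  | none => -1
  | some g =>
    -- comb(S-1, k-1): both arguments are ≥ 0 under Pre_ (comb raises for k ≤ 0)
    let C_val : Int := ((S - 1).toNat.choose (k - 1).toNat : Nat)
    if 500000 < C_val then -2
    else
      (pvA_gen (k.toNat + 1) 1 k 0 max_B [0] 0 500000).1.foldl
        (fun count B => if pvA_PB B g d = 0 then count + 1 else count) 0

-- ===== PORT B =====

-- n.bit_length() for n ≥ 0, tail-recursively (PySem.Int.bitLength is not tail-recursive and
-- overflows the evaluation stack on 3**k for large k; this computes the same value, see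
-- pvB_bitLen_eq below)
def pvB_bitLen (acc : Nat) (n : Nat) : Nat :=
  if h : n = 0 then acc else pvB_bitLen (acc + 1) (n / 2)
  termination_by n
  decreasing_by exact Nat.div_lt_self (Nat.pos_of_ne_zero h) (by norm_num)

def compute_N0_prime_direct_alt (k : Int) : Int :=
  let p3 : Int := 3 ^ k.toNat                       -- 3**k; k ≥ 0 under Pre_
  let S : Int := (pvB_bitLen 0 p3.toNat : Nat)      -- p3.bit_length()
  let d : Int := 2 ^ S.toNat - p3                   -- (1 << S) - p3
  let max_B := S - k
  -- pow(3, -1, d): ported via the Bezout coefficient; exact since gcd(3, d) = 1 (d is never a multiple of 3)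
  let g := PySem.Int.mod (2 * PySem.Int.mod (Int.gcdA 3 d) d) d
  if 500000 < (((S - 1).toNat.choose (k - 1).toNat : Nat) : Int) then -2
  else
    -- dist = {v: {0: 1} for v in range(max_B + 2)}
    let dist0 : PySem.Dict Int (PySem.Dict Int Int) :=
      (PySem.List.pyRange 0 (max_B + 2) 1).foldl
        (fun acc v => acc.insert v (PySem.Dict.empty.insert 0 1)) PySem.Dict.empty
    let dist :=
      (PySem.List.pyRange (k - 1) 0 (-1)).foldl
        (fun dist pos =>
          (PySem.List.pyRange max_B (-1) (-1)).foldl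
            (fun new v =>
              let cv := PySem.Int.mod
                (PySem.Int.powMod g pos.toNat d * PySem.Int.powMod 2 v.toNat d) d
              -- dist[v] and new[v + 1] are exact as `.getD … Dict.empty`: both keys are
              -- always present (dist covers 0..max_B+1, new covers v+1..max_B+1), so the
              -- Python never raises; dict(new[v+1]) copies, which is the identity here
              let cur := ((dist.getD v PySem.Dict.empty).items).foldl
                (fun cur rc =>
                  let r2 := PySem.Int.mod (rc.1 + cv) d
                  cur.insert r2 (cur.getD r2 0 + rc.2))
                (new.getD (v + 1) PySem.Dict.empty)
              new.insert v cur)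
            (PySem.Dict.empty.insert (max_B + 1) PySem.Dict.empty))
        dist0
    (dist.getD 0 PySem.Dict.empty).getD (PySem.Int.mod (-1) d) 0

-- ===== PRECONDITION & SPEC =====
-- Pre_ excludes k ≤ 0, where A raises (ValueError: from `1 << S` with negative S for k < 0,
-- from comb(S-1, k-1) = comb(1, -1) for k = 0).
def Pre_compute_N0_prime_direct (k : Int) : Prop := 1 ≤ k
instance (k : Int) : Decidable (Pre_compute_N0_prime_direct k) := by unfold Pre_compute_N0_prime_direct; infer_instance
def pvWitness_compute_N0_prime_direct : Int := 3

def Spec_compute_N0_prime_direct (k : Int) (out : Int) : Prop := out = compute_N0_prime_direct_alt k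
instance (k : Int) (out : Int) : Decidable (Spec_compute_N0_prime_direct k out) := by unfold Spec_compute_N0_prime_direct; infer_instance

-- ===== CLAIM (what is proved, stated in full; the proofs are below) =====
def Claim_equal_compute_N0_prime_direct : Prop := ∀ (k : Int), Dom_compute_N0_prime_direct k → Pre_compute_N0_prime_direct k → Spec_compute_N0_prime_direct k (compute_N0_prime_direct k)

-- ===== LEMMAS AND PROOFS =====

-- itertools-style combinations_with_replacement list (proof-side only: the common
-- enumeration both counts are related to)
def pvB_cwr : Nat → List Int → List (List Int)
  | 0, _ => [[]]
  | _ + 1, [] => []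
  | n + 1, x :: xs => (pvB_cwr n (x :: xs)).map (fun t => x :: t) ++ pvB_cwr (n + 1) xs
  termination_by n l => (n, l.length)

-- canonical residue of a suffix (B_pos, …) exactly as the DP accumulates it
def pvR (g d : Int) : Int → List Int → Int
  | _, [] => 0
  | pos, b :: bs =>
    PySem.Int.mod (pvR g d (pos + 1) bs +
      PySem.Int.mod (PySem.Int.powMod g pos.toNat d * PySem.Int.powMod 2 b.toNat d) d) d

-- counter C is the residue distribution of nondecreasing suffixes of length m, values in
-- [v, maxB], starting at position pos
def pvCtr (g d maxB : Int) (m : Nat) (pos v : Int) (C : PySem.Dict Int Int) : Prop :=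
  C.keys.Nodup ∧ ∀ r : Int,
    C.getD r 0 = ((pvB_cwr m (PySem.List.pyRange v (maxB + 1) 1)).countP
      (fun t => pvR g d pos t == r) : Int)

def pvInv (g d maxB : Int) (m : Nat) (pos : Int) (D : PySem.Dict Int (PySem.Dict Int Int)) : Prop :=
  ∀ v : Int, 0 ≤ v → v ≤ maxB + 1 → pvCtr g d maxB m pos v (D.getD v PySem.Dict.empty)

lemma pvB_bitLen_eq : ∀ (n : Nat) (acc : Nat), pvB_bitLen acc n = acc + PySem.Int.bitLength (n : Int) := by
  intro n
  induction n using Nat.strong_induction_on with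
  | _ n ih =>
    intro acc
    by_cases h : n = 0
    · subst h
      rw [pvB_bitLen]
      simp [PySem.Int.bitLength_zero]
    · rw [pvB_bitLen, dif_neg h, ih (n / 2) (Nat.div_lt_self (Nat.pos_of_ne_zero h) (by norm_num)),
        PySem.Int.bitLength_natCast (Nat.pos_of_ne_zero h)]
      omega

lemma up_reaches (p : Int) (t : Nat) (hp : 0 ≤ p) (ht : PySem.Int.bitLength p = t) (hp0 : p ≠ 0) :
    ∀ (f : Nat) (s : Int), 0 ≤ s → s.toNat ≤ t → t ≤ s.toNat + f → pvA_S_up f s p = (t : Int) := by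
  have h1 : p.natAbs < 2 ^ t := ht ▸ PySem.Int.lt_two_pow_bitLength p
  have h2 : 2 ^ (t - 1) ≤ p.natAbs := ht ▸ PySem.Int.two_pow_bitLength_le p hp0
  intro f
  induction f with
  | zero =>
    intro s hs hst hts
    have : s.toNat = t := by omega
    simp [pvA_S_up, ← this, Int.toNat_of_nonneg hs]
  | succ f ih =>
    intro s hs hst hts
    rcases eq_or_lt_of_le hst with h | h
    · have hcond : ¬ (2 ^ s.toNat ≤ p) := by
        rw [h]
        have hlt : p < 2 ^ t := by
          have := Int.ofNat_lt.mpr h1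
          push_cast at this
          rw [abs_of_nonneg hp] at this
          exact this
        omega
      simp [pvA_S_up, hcond, ← h, Int.toNat_of_nonneg hs]
    · have hcond : (2 : Int) ^ s.toNat ≤ p := by
        have hb : (2:Nat) ^ s.toNat ≤ 2 ^ (t-1) := Nat.pow_le_pow_right (by norm_num) (by omega)
        have : (2:Nat) ^ s.toNat ≤ p.natAbs := le_trans hb h2
        have := Int.ofNat_le.mpr this
        simpa [Int.natAbs_of_nonneg hp] using this
      have := ih (s + 1) (by omega) (by omega) (by omega)
      simpa [pvA_S_up, hcond] using this

lemma down_fix (p : Int) (t : Nat) (hp : 0 ≤ p) (ht : PySem.Int.bitLength p = t) (hp0 : p ≠ 0) :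
    ∀ (f : Nat), pvA_S_down f (t : Int) p = (t : Int) := by
  have h2 : 2 ^ (t - 1) ≤ p.natAbs := ht ▸ PySem.Int.two_pow_bitLength_le p hp0
  have h2' : (2 : Int) ^ (t - 1) ≤ p := by
    have := Int.ofNat_le.mpr h2
    push_cast at this
    rwa [abs_of_nonneg hp] at this
  intro f
  cases f with
  | zero => simp [pvA_S_down]
  | succ f =>
    rw [pvA_S_down, if_neg]
    rintro ⟨h0, hlt⟩
    have htn : ((t : Int) - 1).toNat = t - 1 := by omega
    rw [htn] at hlt
    omega

lemma bitLength_le_of_lt (p : Int) (m : Nat) (h : p.natAbs < 2 ^ m) : PySem.Int.bitLength p ≤ m := by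
  by_contra hc
  have h1 : 2 ^ (PySem.Int.bitLength p - 1) ≤ p.natAbs := by
    apply PySem.Int.two_pow_bitLength_le
    intro h0
    simp [h0, PySem.Int.bitLength_zero] at hc
  have : (2:Nat) ^ m ≤ 2 ^ (PySem.Int.bitLength p - 1) := by
    apply Nat.pow_le_pow_right (by norm_num)
    omega
  exact lt_irrefl _ ((this.trans h1).trans_lt h)

lemma computeS_eq (k : Int) :
    pvA_computeS k = (PySem.Int.bitLength ((3:Int) ^ k.toNat) : Nat) := by
  set p : Int := 3 ^ k.toNat with hpdef
  set t : Nat := PySem.Int.bitLength p with htdef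
  have hp : 0 ≤ p := by positivity
  have hp0 : p ≠ 0 := by positivity
  have hbound : t ≤ 2 * k.toNat + 2 := by
    apply bitLength_le_of_lt
    have h3 : (3:Nat) ^ k.toNat < 2 ^ (2 * k.toNat + 2) := by
      calc (3:Nat) ^ k.toNat ≤ 4 ^ k.toNat := Nat.pow_le_pow_left (by norm_num) _
        _ = 2 ^ (2 * k.toNat) := by rw [show (4:Nat) = 2^2 by norm_num, ← pow_mul]
        _ < 2 ^ (2 * k.toNat + 2) := Nat.pow_lt_pow_right (by norm_num) (by omega)
    have : p.natAbs = 3 ^ k.toNat := by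
      rw [hpdef]
      simp [Int.natAbs_pow]
    omega
  have hup : pvA_S_up (2 * k.toNat + 4) 0 p = (t : Int) :=
    up_reaches p t hp htdef.symm hp0 _ 0 le_rfl (by omega) (by omega)
  simp only [pvA_computeS]
  rw [← hpdef, hup]
  simpa using down_fix p t hp htdef.symm hp0 _

lemma extgcd_spec : ∀ (f : Nat) (a b : Int), 0 ≤ a → 0 ≤ b → a.natAbs < f →
    (pvA_extgcd f a b).1 = Int.gcd a b ∧
    a * (pvA_extgcd f a b).2.1 + b * (pvA_extgcd f a b).2.2 = Int.gcd a b := by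
  intro f
  induction f with
  | zero => intro a b _ _ h; exact absurd h (by omega)
  | succ f ih =>
    intro a b ha hb hf
    by_cases h0 : a = 0
    · subst h0
      rw [pvA_extgcd, if_pos rfl]
      rw [Int.gcd_zero_left]
      constructor
      · exact (Int.natAbs_of_nonneg hb).symm
      · rw [Int.natAbs_of_nonneg hb]; ring
    · have hapos : 0 < a := lt_of_le_of_ne ha (Ne.symm h0)
      have hmnn : 0 ≤ PySem.Int.mod b a := PySem.Int.mod_nonneg b hapos
      have hmlt : PySem.Int.mod b a < a := PySem.Int.mod_lt b hapos
      obtain ⟨hg, hbez⟩ := ih (PySem.Int.mod b a) a hmnn ha (by omega)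
      have hgeq : Int.gcd (PySem.Int.mod b a) a = Int.gcd a b := by
        rw [PySem.Int.mod_eq_emod_of_pos hapos, Int.gcd_emod b a, Int.gcd_comm]
      have hdm := PySem.Int.floordiv_mul_add_mod b a
      rw [pvA_extgcd, if_neg h0]
      refine ⟨by rw [hg, hgeq], ?_⟩
      rw [← hgeq]
      linear_combination hbez - (pvA_extgcd f (PySem.Int.mod b a) a).2.1 * hdm

lemma inv_mod_unique (m x y : Int) (hgcd : Int.gcd 3 m = 1)
    (hx : 3 * x % m = 1 % m) (hy : 3 * y % m = 1 % m) : x % m = y % m := by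
  have h1 : Int.ModEq m (3 * x) (3 * y) := hx.trans hy.symm
  have h2 : m ∣ 3 * (x - y) := by
    have h := Int.ModEq.dvd h1
    have e : 3 * (x - y) = -(3 * y - 3 * x) := by ring
    rw [e]
    exact dvd_neg.mpr h
  have hc : IsCoprime (m : Int) 3 := by
    rw [Int.isCoprime_iff_gcd_eq_one, Int.gcd_comm]
    exact hgcd
  have h3 : m ∣ (x - y) := hc.dvd_of_dvd_mul_left h2
  exact Int.ModEq.symm (Int.modEq_iff_dvd.mpr (by simpa using h3))

lemma modinv_eq_gcdA (m : Int) (hm : 1 ≤ m) (hgcd : Int.gcd 3 m = 1) :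
    pvA_modinv 3 m = some (PySem.Int.mod (Int.gcdA 3 m) m) := by
  by_cases h1 : m = 1
  · subst h1
    rw [pvA_modinv, if_pos rfl, PySem.Int.mod_eq_emod_of_pos (by norm_num), Int.emod_one]
  · have hmpos : 0 < m := by omega
    have hmod3 : PySem.Int.mod 3 m = 3 % m := PySem.Int.mod_eq_emod_of_pos hmpos
    have hnn : 0 ≤ PySem.Int.mod 3 m := PySem.Int.mod_nonneg 3 hmpos
    obtain ⟨hg, hbez⟩ := extgcd_spec ((PySem.Int.mod 3 m).natAbs + 1) (PySem.Int.mod 3 m) m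
      hnn (by omega) (by omega)
    have hgcd' : Int.gcd (PySem.Int.mod 3 m) m = 1 := by
      rw [hmod3, Int.gcd_emod 3 m]; exact hgcd
    rw [pvA_modinv, if_neg h1]
    simp only [pvA_extended_gcd]
    rw [if_neg (by rw [hg, hgcd']; norm_num)]
    congr 1
    set x := (pvA_extgcd ((PySem.Int.mod 3 m).natAbs + 1) (PySem.Int.mod 3 m) m).2.1 with hxdef
    set y := (pvA_extgcd ((PySem.Int.mod 3 m).natAbs + 1) (PySem.Int.mod 3 m) m).2.2 with hydef
    rw [hgcd'] at hbez
    have hxinv : 3 * x % m = 1 % m := by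
      have hmeq : Int.ModEq m (PySem.Int.mod 3 m) 3 := by
        rw [hmod3]; exact Int.emod_emod_of_dvd 3 dvd_rfl
      have : Int.ModEq m (PySem.Int.mod 3 m * x) 1 := by
        have : PySem.Int.mod 3 m * x = 1 - m * y := by push_cast at hbez; linarith
        rw [this]
        exact Int.sub_mul_emod_self_left 1 m y
      exact (hmeq.mul_right x).symm.trans this
    have hainv : 3 * Int.gcdA 3 m % m = 1 % m := by
      have := Int.gcd_eq_gcd_ab 3 m
      rw [hgcd] at this
      have heq : 3 * Int.gcdA 3 m = 1 - m * Int.gcdB 3 m := by push_cast at this; linarith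
      rw [heq]
      exact Int.sub_mul_emod_self_left 1 m (Int.gcdB 3 m)
    rw [PySem.Int.mod_eq_emod_of_pos hmpos, PySem.Int.mod_eq_emod_of_pos hmpos]
    exact inv_mod_unique m x (Int.gcdA 3 m) hgcd hxinv hainv

def pvPoly : List Int → Int → Int
  | [], _ => 0
  | b :: bs, g => 2 ^ b.toNat + g * pvPoly bs g

lemma pvA_PB_fold (g d : Int) (hd : 0 < d) :
    ∀ (B : List Int) (s gp : Int), B ≠ [] →
      (B.foldl (fun (sp : Int × Int) bj =>
        (PySem.Int.mod (sp.1 + sp.2 * PySem.Int.powMod 2 bj.toNat d) d,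
         PySem.Int.mod (sp.2 * g) d)) (s, gp)).1 = (s + gp * pvPoly B g) % d := by
  intro B
  induction B with
  | nil => intro s gp h; exact absurd rfl h
  | cons b bs ih =>
    intro s gp _
    simp only [List.foldl_cons]
    rw [PySem.Int.powMod, PySem.Int.mod_eq_emod_of_pos hd, PySem.Int.mod_eq_emod_of_pos hd,
      PySem.Int.mod_eq_emod_of_pos hd]
    by_cases hbs : bs = []
    · subst hbs
      simp only [List.foldl_nil, pvPoly]
      have h1 : Int.ModEq d (2 ^ b.toNat % d) (2 ^ b.toNat) := Int.emod_emod_of_dvd _ dvd_rfl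
      calc (s + gp * (2 ^ b.toNat % d)) % d
          = (s + gp * 2 ^ b.toNat) % d := ((h1.mul_left gp).add_left s)
        _ = (s + gp * (2 ^ b.toNat + g * 0)) % d := by ring_nf
    · rw [ih _ _ hbs]
      have h1 : Int.ModEq d ((s + gp * (2 ^ b.toNat % d)) % d) (s + gp * 2 ^ b.toNat) := by
        have e : Int.ModEq d (2 ^ b.toNat % d) (2 ^ b.toNat) := Int.emod_emod_of_dvd _ dvd_rfl
        exact (Int.emod_emod_of_dvd _ dvd_rfl).trans ((e.mul_left gp).add_left s)
      have h2 : Int.ModEq d ((gp * g) % d) (gp * g) := Int.emod_emod_of_dvd _ dvd_rfl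
      have h3 := h1.add (h2.mul_right (pvPoly bs g))
      calc ((s + gp * (2 ^ b.toNat % d)) % d + gp * g % d * pvPoly bs g) % d
          = (s + gp * 2 ^ b.toNat + gp * g * pvPoly bs g) % d := h3
        _ = (s + gp * pvPoly (b :: bs) g) % d := by rw [pvPoly]; ring_nf

lemma cwr_card : ∀ (n : Nat) (l : List Int),
    (pvB_cwr n l).length = (l.length + n - 1).choose n := by
  intro n l
  induction n, l using pvB_cwr.induct with
  | case1 l => simp [pvB_cwr]
  | case2 n => simp [pvB_cwr]
  | case3 n x xs ih1 ih2 =>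
    simp only [pvB_cwr, List.length_append, List.length_map, ih1, ih2, List.length_cons]
    rw [show xs.length + 1 + n - 1 = xs.length + n by omega,
      show xs.length + (n + 1) - 1 = xs.length + n by omega,
      show xs.length + 1 + (n + 1) - 1 = (xs.length + n).succ by omega,
      Nat.choose_succ_succ]

lemma foldl_accum {β : Type} (h : Int → Int → List β × Int) :
    ∀ (l : List Int) (L : List β) (c : Int),
      l.foldl (fun acc v => (acc.1 ++ (h v acc.2).1, (h v acc.2).2)) (L, c)
      = (L ++ (l.foldl (fun acc v => (acc.1 ++ (h v acc.2).1, (h v acc.2).2)) ([], c)).1,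
         (l.foldl (fun acc v => (acc.1 ++ (h v acc.2).1, (h v acc.2).2)) ([], c)).2) := by
  intro l
  induction l with
  | nil => intro L c; simp
  | cons v vs ih =>
    intro L c
    simp only [List.foldl_cons, List.nil_append]
    rw [ih (L ++ (h v c).1) (h v c).2, ih ((h v c).1) (h v c).2]
    simp [List.append_assoc]

lemma genA_eq (kk M limit : Int) :
    ∀ (n : Nat) (f : Nat) (m cnt : Int) (current : List Int), n ≤ f →
      cnt + ((pvB_cwr n (PySem.List.pyRange m (M + 1) 1)).length : Int) ≤ limit →
      pvA_gen f (kk - n) kk m M current cnt limit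
        = ((pvB_cwr n (PySem.List.pyRange m (M + 1) 1)).map (fun t => current ++ t),
           cnt + (pvB_cwr n (PySem.List.pyRange m (M + 1) 1)).length) := by
  intro n
  induction n with
  | zero =>
    intro f m cnt current _ hlim
    simp only [pvB_cwr, List.length_cons, List.length_nil] at hlim ⊢
    rw [pvA_gen.eq_def, if_neg (by omega), if_pos (by push_cast; ring)]
    simp
  | succ n ih =>
    intro f m cnt current hf hlim
    by_cases hstop : limit ≤ cnt
    · have hlen : (pvB_cwr (n + 1) (PySem.List.pyRange m (M + 1) 1)).length = 0 := by
        omega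
      rw [pvA_gen.eq_def, if_pos hstop, List.length_eq_zero_iff.mp hlen]
      simp
    · obtain ⟨f', rfl⟩ : ∃ f', f = f' + 1 := ⟨f - 1, by omega⟩
      rw [pvA_gen.eq_def, if_neg hstop, if_neg (by push_cast; intro h; omega)]
      simp only []
      rw [show kk - ((n + 1 : Nat) : Int) + 1 = kk - (n : Nat) from by push_cast; ring]
      have loop : ∀ (r : Nat) (m cnt : Int), (M + 1 - m).toNat = r →
          cnt + ((pvB_cwr (n + 1) (PySem.List.pyRange m (M + 1) 1)).length : Int) ≤ limit →
          (PySem.List.pyRange m (M + 1) 1).foldl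
            (fun acc v =>
              (acc.1 ++ (pvA_gen f' (kk - (n : Nat)) kk v M (current ++ [v]) acc.2 limit).1,
               (pvA_gen f' (kk - (n : Nat)) kk v M (current ++ [v]) acc.2 limit).2))
            ([], cnt)
          = ((pvB_cwr (n + 1) (PySem.List.pyRange m (M + 1) 1)).map (fun t => current ++ t),
             cnt + (pvB_cwr (n + 1) (PySem.List.pyRange m (M + 1) 1)).length) := by
        intro r
        induction r with
        | zero =>
          intro m cnt hr hl
          rw [PySem.List.pyRange_one_eq_nil (by omega)]
          simp [pvB_cwr]
        | succ r ihr =>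
          intro m cnt hr hl
          have hm : m < M + 1 := by omega
          rw [PySem.List.pyRange_one_cons hm]
          have hsplit : pvB_cwr (n + 1) (m :: PySem.List.pyRange (m + 1) (M + 1) 1)
              = (pvB_cwr n (m :: PySem.List.pyRange (m + 1) (M + 1) 1)).map (fun t => m :: t)
                ++ pvB_cwr (n + 1) (PySem.List.pyRange (m + 1) (M + 1) 1) := by
            rw [pvB_cwr]
          rw [← PySem.List.pyRange_one_cons hm] at hsplit
          have hlens : (pvB_cwr (n + 1) (PySem.List.pyRange m (M + 1) 1)).length
              = (pvB_cwr n (PySem.List.pyRange m (M + 1) 1)).length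
                + (pvB_cwr (n + 1) (PySem.List.pyRange (m + 1) (M + 1) 1)).length := by
            rw [hsplit]
            simp [PySem.List.pyRange_one_cons hm]
          rw [List.foldl_cons]
          have hhead := ih f' m cnt (current ++ [m]) (by omega)
            (by rw [hlens] at hl; push_cast at hl ⊢; omega)
          rw [hhead]
          simp only [List.nil_append]
          rw [foldl_accum (fun v c => pvA_gen f' (kk - (n : Nat)) kk v M (current ++ [v]) c limit)]
          rw [ihr (m + 1) (cnt + (pvB_cwr n (PySem.List.pyRange m (M + 1) 1)).length)
            (by omega) (by rw [hlens] at hl; push_cast at hl ⊢; omega)]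
          rw [← PySem.List.pyRange_one_cons hm, hsplit]
          simp only [List.map_append, List.map_map, List.length_append]
          refine Prod.ext ?_ ?_
          · simp [Function.comp_def, List.append_assoc]
          · simp only [List.length_map]; push_cast; ring
      exact loop (M + 1 - m).toNat m cnt rfl hlim

-- pvR is the canonical representative of g^pos * pvPoly t g mod d
lemma pvR_eq (g d : Int) (hd : 0 < d) :
    ∀ (t : List Int) (pos : Int), 0 ≤ pos →
      pvR g d pos t = (g ^ pos.toNat * pvPoly t g) % d := by
  intro t
  induction t with
  | nil => intro pos _; simp [pvR, pvPoly]
  | cons b bs ih =>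
    intro pos hpos
    have h1 : (pos + 1).toNat = pos.toNat + 1 := by omega
    rw [pvR, ih (pos + 1) (by omega), h1, PySem.Int.powMod, PySem.Int.powMod,
      PySem.Int.mod_eq_emod_of_pos hd, PySem.Int.mod_eq_emod_of_pos hd,
      PySem.Int.mod_eq_emod_of_pos hd, PySem.Int.mod_eq_emod_of_pos hd]
    have e1 : Int.ModEq d (g ^ (pos.toNat + 1) * pvPoly bs g % d)
        (g ^ (pos.toNat + 1) * pvPoly bs g) := Int.emod_emod_of_dvd _ dvd_rfl
    have e2 : Int.ModEq d ((g ^ pos.toNat % d) * (2 ^ b.toNat % d) % d)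
        (g ^ pos.toNat * 2 ^ b.toNat) := by
      have a1 : Int.ModEq d (g ^ pos.toNat % d) (g ^ pos.toNat) := Int.emod_emod_of_dvd _ dvd_rfl
      have a2 : Int.ModEq d (2 ^ b.toNat % d) (2 ^ b.toNat) := Int.emod_emod_of_dvd _ dvd_rfl
      exact (Int.emod_emod_of_dvd _ dvd_rfl).trans (a1.mul a2)
    have h := e1.add e2
    calc (g ^ (pos.toNat + 1) * pvPoly bs g % d + (g ^ pos.toNat % d) * (2 ^ b.toNat % d) % d) % d
        = (g ^ (pos.toNat + 1) * pvPoly bs g + g ^ pos.toNat * 2 ^ b.toNat) % d := h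
      _ = (g ^ pos.toNat * pvPoly (b :: bs) g) % d := by rw [pvPoly]; ring_nf

-- A's acceptance test, in terms of pvR
lemma cond_iff (g d : Int) (hd : 0 < d) (t : List Int) :
    (pvA_PB (0 :: t) g d = 0) ↔ (pvR g d 1 t = PySem.Int.mod (-1) d) := by
  rw [pvA_PB, pvA_PB_fold g d hd (0 :: t) 0 1 (by simp),
    pvR_eq g d hd t 1 (by norm_num), PySem.Int.mod_eq_emod_of_pos hd]
  have hP : (0 : Int) + 1 * pvPoly (0 :: t) g = 1 + g ^ (1 : Int).toNat * pvPoly t g := by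
    rw [pvPoly]; norm_num
  rw [hP]
  set P := g ^ (1 : Int).toNat * pvPoly t g with hPdef
  constructor
  · intro h
    have hdvd : d ∣ (1 + P) := Int.dvd_of_emod_eq_zero h
    refine Int.ModEq.symm (Int.modEq_iff_dvd.mpr ?_)
    have he : P - -1 = 1 + P := by ring
    rw [he]
    exact hdvd
  · intro h
    have hdvd : d ∣ (P - -1) := (Int.modEq_iff_dvd.mp (Int.ModEq.symm h))
    apply Int.emod_eq_zero_of_dvd
    have he : (1 : Int) + P = P - -1 := by ring
    rw [he]
    exact hdvd

-- counting a fold with an if-increment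
lemma foldl_ite_count (p : List Int → Prop) [DecidablePred p] (q : List Int → Bool)
    (hpq : ∀ t, p t ↔ q t = true) :
    ∀ (L : List (List Int)) (c : Int),
      L.foldl (fun c t => if p t then c + 1 else c) c = c + (L.countP q : Int) := by
  intro L
  induction L with
  | nil => intro c; simp
  | cons t L ih =>
    intro c
    rw [List.foldl_cons, ih, List.countP_cons]
    by_cases hp : p t
    · have hq : q t = true := (hpq t).mp hp
      simp only [hp, if_pos, hq]
      push_cast
      ring
    · have hq : ¬ q t = true := fun h => hp ((hpq t).mpr h)
      simp [hp, hq]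

-- the dict comprehension {v: {0:1} for v in range(n)}
lemma getD_fold_insert_const (c : PySem.Dict Int Int) :
    ∀ (l : List Int) (D : PySem.Dict Int (PySem.Dict Int Int)) (x : Int),
      (l.foldl (fun acc v => acc.insert v c) D).getD x PySem.Dict.empty
        = if x ∈ l then c else D.getD x PySem.Dict.empty := by
  intro l
  induction l with
  | nil => intro D x; simp
  | cons a l ih =>
    intro D x
    rw [List.foldl_cons, ih]
    by_cases hx : x ∈ l
    · simp [hx]
    · by_cases hxa : x = a
      · simp [hxa]
      · simp [hx, hxa, PySem.Dict.getD_insert]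

-- pointwise value of the merge fold
lemma fold_getD (cv d : Int) :
    ∀ (items : List (Int × Int)) (cur : PySem.Dict Int Int) (q : Int),
      (items.foldl (fun c rc => c.insert (PySem.Int.mod (rc.1 + cv) d)
          (c.getD (PySem.Int.mod (rc.1 + cv) d) 0 + rc.2)) cur).getD q 0
        = cur.getD q 0
          + (items.map (fun rc => if PySem.Int.mod (rc.1 + cv) d = q then rc.2 else 0)).sum := by
  intro items
  induction items with
  | nil => intro cur q; simp
  | cons rc items ih =>
    intro cur q
    rw [List.foldl_cons, ih, List.map_cons, List.sum_cons, PySem.Dict.getD_insert]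
    by_cases h : q = PySem.Int.mod (rc.1 + cv) d
    · rw [if_pos h, if_pos h.symm, h]
      ring
    · rw [if_neg h, if_neg (fun hh => h hh.symm)]
      ring

-- sum of an indicator over a nodup list containing the element
lemma indicator_sum (φ : Int → Int) (q x : Int) :
    ∀ (K : List Int), K.Nodup → x ∈ K →
      (K.map (fun r => if φ r = q ∧ r = x then (1:Int) else 0)).sum
        = if φ x = q then (1:Int) else 0 := by
  intro K
  induction K with
  | nil => intro _ h; simp at h
  | cons a K ih =>
    intro hnd hx
    rw [List.map_cons, List.sum_cons]
    rcases List.mem_cons.mp hx with rfl | hx'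
    · have hnotin : x ∉ K := (List.nodup_cons.mp hnd).1
      have hz : (K.map (fun r => if φ r = q ∧ r = x then (1:Int) else 0)).sum = 0 := by
        apply List.sum_eq_zero
        intro y hy
        obtain ⟨r, hr, rfl⟩ := List.mem_map.mp hy
        have hne : r ≠ x := fun h => hnotin (h ▸ hr)
        simp [hne]
      rw [hz]
      by_cases hq : φ x = q
      · simp [hq]
      · simp [hq]
    · have hne : a ≠ x := by
        rintro rfl
        exact (List.nodup_cons.mp hnd).1 hx'
      rw [ih (List.nodup_cons.mp hnd).2 hx']
      simp [hne]

-- partition a count by the (finitely many) residue values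
lemma partition_count (res : List Int → Int) (φ : Int → Int) (q : Int) :
    ∀ (L : List (List Int)) (K : List Int), K.Nodup → (∀ t ∈ L, res t ∈ K) →
      (K.map (fun r => if φ r = q then (L.countP (fun t => res t == r) : Int) else 0)).sum
        = (L.countP (fun t => φ (res t) == q) : Int) := by
  intro L
  induction L with
  | nil =>
    intro K _ _
    simp only [List.countP_nil, Nat.cast_zero]
    apply List.sum_eq_zero
    intro y hy
    obtain ⟨r, _, rfl⟩ := List.mem_map.mp hy
    simp
  | cons t L ih =>
    intro K hnd hmem
    have hL : ∀ u ∈ L, res u ∈ K := fun u hu => hmem u (List.mem_cons_of_mem _ hu)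
    have hx : res t ∈ K := hmem t List.mem_cons_self
    have key : ∀ r : Int,
        (if φ r = q then ((L.countP (fun u => res u == r) : Nat)
            + if res t == r then 1 else 0 : Int) else 0)
        = (if φ r = q then ((L.countP (fun u => res u == r) : Nat) : Int) else 0)
          + (if φ r = q ∧ r = res t then (1 : Int) else 0) := by
      intro r
      by_cases h1 : φ r = q
      · by_cases h2 : res t = r
        · subst h2
          simp [h1]
        · have h2' : ¬ (res t == r) = true := by simpa using h2
          have h2'' : r ≠ res t := fun h => h2 h.symm
          simp [h1, h2', h2'']
      · simp [h1]
    calc (K.map (fun r => if φ r = q then ((t :: L).countP (fun u => res u == r) : Int) else 0)).sum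
        = (K.map (fun r =>
            (if φ r = q then ((L.countP (fun u => res u == r) : Nat) : Int) else 0)
              + (if φ r = q ∧ r = res t then (1 : Int) else 0))).sum := by
          apply congrArg
          apply List.map_congr_left
          intro r _
          rw [List.countP_cons]
          push_cast
          exact key r
      _ = (K.map (fun r => if φ r = q then ((L.countP (fun u => res u == r) : Nat) : Int) else 0)).sum
            + (K.map (fun r => if φ r = q ∧ r = res t then (1 : Int) else 0)).sum :=
          PySem.List.sum_map_add_int K _ _
      _ = ((t :: L).countP (fun u => φ (res u) == q) : Int) := by
          rw [ih K hnd hL, indicator_sum φ q (res t) K hnd hx, List.countP_cons]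
          push_cast
          by_cases hq : φ (res t) = q
          · simp [hq]
          · have hq' : ¬ (φ (res t) == q) = true := by simpa using hq
            simp [hq, hq']

-- the merge step produces the counter for (m+1, pos, v)
lemma merge_ctr (g d maxB : Int) (m : Nat) (pos v : Int) (hv : v ≤ maxB)
    (C N1 : PySem.Dict Int Int)
    (hC : pvCtr g d maxB m (pos + 1) v C) (hN1 : pvCtr g d maxB (m + 1) pos (v + 1) N1) :
    pvCtr g d maxB (m + 1) pos v
      (C.items.foldl
        (fun cur rc =>
          cur.insert (PySem.Int.mod (rc.1 +
              PySem.Int.mod (PySem.Int.powMod g pos.toNat d * PySem.Int.powMod 2 v.toNat d) d) d)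
            (cur.getD (PySem.Int.mod (rc.1 +
              PySem.Int.mod (PySem.Int.powMod g pos.toNat d * PySem.Int.powMod 2 v.toNat d) d) d) 0
              + rc.2))
        N1) := by
  set cv : Int := PySem.Int.mod (PySem.Int.powMod g pos.toNat d * PySem.Int.powMod 2 v.toNat d) d
    with hcv
  set L := pvB_cwr m (PySem.List.pyRange v (maxB + 1) 1) with hL
  constructor
  · exact PySem.Dict.nodup_keys_foldl_insert_key C.items
      (fun rc => PySem.Int.mod (rc.1 + cv) d)
      (fun cur rc => cur.getD (PySem.Int.mod (rc.1 + cv) d) 0 + rc.2) N1 hN1.1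
  · intro q
    rw [fold_getD cv d C.items N1 q, hN1.2 q]
    -- rewrite the item sum through the keys of C
    have hitems : C.items = C.keys.map (fun r => (r, C.getD r 0)) :=
      PySem.Dict.items_eq_map_keys C hC.1 0
    have hmem : ∀ t ∈ L, pvR g d (pos + 1) t ∈ C.keys := by
      intro t ht
      by_contra hmemn
      have hcont : C.contains (pvR g d (pos + 1) t) = false := by
        rw [PySem.Dict.contains_eq_decide_mem_keys]
        simpa using hmemn
      have h0 : C.getD (pvR g d (pos + 1) t) 0 = 0 :=
        PySem.Dict.getD_of_not_contains C 0 hcont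
      rw [hC.2 (pvR g d (pos + 1) t)] at h0
      have h0' := Int.ofNat_inj.mp h0
      rw [List.countP_eq_zero] at h0'
      exact absurd (by simp : (pvR g d (pos + 1) t == pvR g d (pos + 1) t) = true) (h0' t ht)
    have hsum : (C.items.map (fun rc => if PySem.Int.mod (rc.1 + cv) d = q then rc.2 else 0)).sum
        = (L.countP (fun t => PySem.Int.mod (pvR g d (pos + 1) t + cv) d == q) : Int) := by
      rw [hitems, List.map_map]
      have hcg : (C.keys.map ((fun rc : Int × Int =>
            if PySem.Int.mod (rc.1 + cv) d = q then rc.2 else 0) ∘ fun r => (r, C.getD r 0)))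
          = C.keys.map (fun r => if PySem.Int.mod (r + cv) d = q
              then ((L.countP (fun t => pvR g d (pos + 1) t == r) : Nat) : Int) else 0) := by
        apply List.map_congr_left
        intro r _
        simp only [Function.comp]
        rw [hC.2 r]
      rw [hcg]
      have hpart := partition_count (fun t => pvR g d (pos + 1) t)
        (fun r => PySem.Int.mod (r + cv) d) q L C.keys hC.1 hmem
      simpa using hpart
    rw [hsum]
    -- unfold one level of the enumeration at (m+1, v)
    have hrange : PySem.List.pyRange v (maxB + 1) 1 = v :: PySem.List.pyRange (v + 1) (maxB + 1) 1 :=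
      PySem.List.pyRange_one_cons (by omega)
    have hcwr : pvB_cwr (m + 1) (PySem.List.pyRange v (maxB + 1) 1)
        = (pvB_cwr m (PySem.List.pyRange v (maxB + 1) 1)).map (fun t => v :: t)
          ++ pvB_cwr (m + 1) (PySem.List.pyRange (v + 1) (maxB + 1) 1) := by
      rw [hrange, pvB_cwr, ← hrange]
    rw [hcwr, List.countP_append]
    have hh : ((L.map (fun t => v :: t)).countP (fun u => pvR g d pos u == q) : Int)
        = (L.countP (fun t => PySem.Int.mod (pvR g d (pos + 1) t + cv) d == q) : Int) := by
      rw [List.countP_map]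
      congr 1
    rw [← hL]
    push_cast
    rw [hh]
    ring

-- the inner (descending v) loop establishes the counters for one more position
lemma inner_loop (g d maxB : Int) (m : Nat) (pos : Int)
    (D : PySem.Dict Int (PySem.Dict Int Int)) (hD : pvInv g d maxB m (pos + 1) D) :
    ∀ (n : Nat) (v0 : Int), v0 ≤ maxB → (v0 + 1).toNat = n →
      ∀ N : PySem.Dict Int (PySem.Dict Int Int),
        (∀ v : Int, v0 < v → v ≤ maxB + 1 → pvCtr g d maxB (m + 1) pos v (N.getD v PySem.Dict.empty)) →
        ∀ v : Int, 0 ≤ v → v ≤ maxB + 1 →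
          pvCtr g d maxB (m + 1) pos v
            (((PySem.List.pyRange v0 (-1) (-1)).foldl
              (fun new v =>
                let cv := PySem.Int.mod
                  (PySem.Int.powMod g pos.toNat d * PySem.Int.powMod 2 v.toNat d) d
                let cur := ((D.getD v PySem.Dict.empty).items).foldl
                  (fun cur rc =>
                    let r2 := PySem.Int.mod (rc.1 + cv) d
                    cur.insert r2 (cur.getD r2 0 + rc.2))
                  (new.getD (v + 1) PySem.Dict.empty)
                new.insert v cur) N).getD v PySem.Dict.empty) := by
  intro n
  induction n with
  | zero =>
    intro v0 hv0 hn N hN v hv1 hv2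
    rw [PySem.List.pyRange_neg_one_eq_nil (by omega : v0 ≤ -1)]
    exact hN v (by omega) hv2
  | succ n ih =>
    intro v0 hv0 hn N hN v hv1 hv2
    have hv00 : 0 ≤ v0 := by omega
    rw [PySem.List.pyRange_neg_one_cons (by omega : (-1:Int) < v0), List.foldl_cons]
    apply ih (v0 - 1) (by omega) (by omega)
    · intro w hw1 hw2
      by_cases hwv : w = v0
      · subst hwv
        simp only [PySem.Dict.getD_insert_self]
        exact merge_ctr g d maxB m pos w hv0 _ _ (hD w (by omega) (by omega))
          (hN (w + 1) (by omega) (by omega))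
      · simp only [PySem.Dict.getD_insert]
        rw [if_neg hwv]
        exact hN w (by omega) hw2
    · exact hv1
    · exact hv2

-- the outer (descending pos) loop
lemma outer_loop (g d maxB kk : Int) :
    ∀ (n : Nat) (p0 : Int), 0 ≤ p0 → p0 ≤ kk - 1 → p0.toNat = n →
      ∀ D : PySem.Dict Int (PySem.Dict Int Int), pvInv g d maxB ((kk - 1 - p0).toNat) (p0 + 1) D →
        pvInv g d maxB ((kk - 1).toNat) 1
          ((PySem.List.pyRange p0 0 (-1)).foldl
            (fun dist pos =>
              (PySem.List.pyRange maxB (-1) (-1)).foldl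
                (fun new v =>
                  let cv := PySem.Int.mod
                    (PySem.Int.powMod g pos.toNat d * PySem.Int.powMod 2 v.toNat d) d
                  let cur := ((dist.getD v PySem.Dict.empty).items).foldl
                    (fun cur rc =>
                      let r2 := PySem.Int.mod (rc.1 + cv) d
                      cur.insert r2 (cur.getD r2 0 + rc.2))
                    (new.getD (v + 1) PySem.Dict.empty)
                  new.insert v cur)
                (PySem.Dict.empty.insert (maxB + 1) PySem.Dict.empty))
            D) := by
  intro n
  induction n with
  | zero =>
    intro p0 h0 hk hn D hD
    have hp : p0 = 0 := by omega
    subst hp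
    rw [PySem.List.pyRange_neg_one_eq_nil (le_refl (0 : Int))]
    simp only [List.foldl_nil]
    simpa using hD
  | succ n ih =>
    intro p0 h0 hk hn D hD
    have hp1 : 1 ≤ p0 := by omega
    rw [PySem.List.pyRange_neg_one_cons (by omega : (0:Int) < p0), List.foldl_cons]
    have hinit : ∀ v : Int, maxB < v → v ≤ maxB + 1 →
        pvCtr g d maxB ((kk - 1 - p0).toNat + 1) p0 v
          ((PySem.Dict.empty.insert (maxB + 1) (PySem.Dict.empty : PySem.Dict Int Int)).getD v
            PySem.Dict.empty) := by
      intro v hv1 hv2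
      have hv : v = maxB + 1 := by omega
      subst hv
      rw [PySem.Dict.getD_insert_self]
      refine ⟨PySem.Dict.nodup_keys_empty, ?_⟩
      intro r
      rw [PySem.List.pyRange_one_eq_nil le_rfl]
      simp [pvB_cwr]
    have hstep : pvInv g d maxB ((kk - 1 - (p0 - 1)).toNat) ((p0 - 1) + 1)
        ((PySem.List.pyRange maxB (-1) (-1)).foldl
          (fun new v =>
            let cv := PySem.Int.mod
              (PySem.Int.powMod g p0.toNat d * PySem.Int.powMod 2 v.toNat d) d
            let cur := ((D.getD v PySem.Dict.empty).items).foldl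
              (fun cur rc =>
                let r2 := PySem.Int.mod (rc.1 + cv) d
                cur.insert r2 (cur.getD r2 0 + rc.2))
              (new.getD (v + 1) PySem.Dict.empty)
            new.insert v cur)
          (PySem.Dict.empty.insert (maxB + 1) PySem.Dict.empty)) := by
      have hm : (kk - 1 - (p0 - 1)).toNat = (kk - 1 - p0).toNat + 1 := by omega
      rw [hm, show (p0 - 1) + 1 = p0 by ring]
      intro v hv1 hv2
      exact inner_loop g d maxB ((kk - 1 - p0).toNat) p0 D hD ((maxB + 1).toNat) maxB
        le_rfl rfl (PySem.Dict.empty.insert (maxB + 1) PySem.Dict.empty) hinit v hv1 hv2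
    exact ih (p0 - 1) (by omega) (by omega) (by omega) _ hstep

theorem main_eq (k : Int) (hk : 1 ≤ k) :
    compute_N0_prime_direct k = compute_N0_prime_direct_alt k := by
  have hk0 : 0 ≤ k := by omega
  set K : Nat := k.toNat with hK
  have hK1 : 1 ≤ K := by omega
  set p : Int := 3 ^ K with hp
  set t : Nat := PySem.Int.bitLength p with ht
  have hp1 : 1 ≤ p := one_le_pow₀ (by norm_num)
  have hp0 : p ≠ 0 := by omega
  have hpt : p < 2 ^ t := by
    have := PySem.Int.lt_two_pow_bitLength p
    rw [← ht] at this
    have h2 := Int.ofNat_lt.mpr this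
    push_cast at h2
    rwa [abs_of_nonneg (by omega : (0:Int) ≤ p)] at h2
  have h2t : 2 ^ (t - 1) ≤ p := by
    have := PySem.Int.two_pow_bitLength_le p hp0
    rw [← ht] at this
    have h2 := Int.ofNat_le.mpr this
    push_cast at h2
    rwa [abs_of_nonneg (by omega : (0:Int) ≤ p)] at h2
  set d : Int := 2 ^ t - p with hd
  have hdpos : 0 < d := by omega
  have hkt : k < (t : Int) := by
    have h2k : (2:Int) ^ K ≤ p := by
      rw [hp]
      exact pow_le_pow_left₀ (by norm_num) (by norm_num) K
    have : (2:Int) ^ K < 2 ^ t := lt_of_le_of_lt h2k hpt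
    have : K < t := by
      by_contra hc
      exact absurd (pow_le_pow_right₀ (by norm_num : (1:Int) ≤ 2) (by omega : t ≤ K)) (by omega)
    omega
  have hgcd : Int.gcd 3 d = 1 := by
    have hnd : ¬ ((3:Int) ∣ d) := by
      intro hdvd
      have h3p : (3:Int) ∣ p := by
        rw [hp]
        exact dvd_pow_self 3 (by omega)
      have h32 : (3:Int) ∣ 2 ^ t := by
        have : (2:Int) ^ t = d + p := by omega
        rw [this]
        exact dvd_add hdvd h3p
      have hpr : Prime (3 : Int) := Int.prime_three
      have := hpr.dvd_of_dvd_pow h32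
      norm_num at this
    have hnat : ¬ (3 ∣ d.natAbs) := by
      intro hdvd
      apply hnd
      have h : ((3:Nat) : Int) ∣ d := Int.natCast_dvd.mpr hdvd
      simpa using h
    have hcop : Nat.Coprime 3 d.natAbs :=
      (Nat.Prime.coprime_iff_not_dvd (by norm_num)).mpr hnat
    simpa [Int.gcd] using hcop
  have hS : pvA_computeS k = (t : Int) := by
    have h := computeS_eq k
    rw [← hK, ← hp, ← ht] at h
    exact h
  have hD : pvA_computeD k = d := by
    rw [pvA_computeD, hS, ← hK, ← hp]
    simp [hd]
  have hG : pvA_computeG k = some (PySem.Int.mod (2 * PySem.Int.mod (Int.gcdA 3 d) d) d) := by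
    rw [pvA_computeG]
    simp only [hD]
    rw [modinv_eq_gcdA d (by omega) hgcd]
  have hSB : pvB_bitLen 0 p.toNat = t := by
    rw [pvB_bitLen_eq, ht, hp]
    rw [Int.toNat_of_nonneg (by positivity)]
    omega
  simp only [compute_N0_prime_direct, compute_N0_prime_direct_alt, hD, hS, hG, hSB, ← hK, ← hp]
  simp only [Int.toNat_natCast, ← hd]
  split_ifs with hC
  · rfl
  set g : Int := PySem.Int.mod (2 * PySem.Int.mod (Int.gcdA 3 d) d) d with hg
  set n : Nat := (k - 1).toNat with hn
  set M : Int := (t : Int) - k with hM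
  set T := pvB_cwr n (PySem.List.pyRange 0 (M + 1) 1) with hT
  have hlenR : (PySem.List.pyRange 0 (M + 1) 1).length = M.toNat + 1 := by
    rw [PySem.List.length_pyRange_one]; omega
  have hTlen : (T.length : Int) ≤ 500000 := by
    rw [hT, cwr_card, hlenR]
    rw [show M.toNat + 1 + n - 1 = ((t : Int) - 1).toNat by omega]
    omega
  have hgen := genA_eq k M 500000 n (K + 1) 0 0 [0] (by omega) (by rw [← hT]; omega)
  rw [show k - ((n : Nat) : Int) = 1 by omega] at hgen
  rw [← hT] at hgen
  rw [hgen, List.foldl_map]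
  have hA : T.foldl (fun count u => if pvA_PB ([0] ++ u) g d = 0 then count + 1 else count) 0
      = 0 + (T.countP (fun u => pvR g d 1 u == PySem.Int.mod (-1) d) : Int) := by
    apply foldl_ite_count
    intro u
    constructor
    · intro h
      exact beq_iff_eq.mpr ((cond_iff g d hdpos u).mp h)
    · intro h
      exact (cond_iff g d hdpos u).mpr (beq_iff_eq.mp h)
  rw [hA]
  -- B side: the DP invariant
  have hInv0 : pvInv g d M 0 k
      ((PySem.List.pyRange 0 (M + 2) 1).foldl
        (fun acc v => acc.insert v (PySem.Dict.empty.insert 0 1)) PySem.Dict.empty) := by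
    intro v hv1 hv2
    rw [getD_fold_insert_const]
    rw [if_pos (PySem.List.mem_pyRange_one.mpr ⟨hv1, by omega⟩)]
    refine ⟨PySem.Dict.nodup_keys_insert _ _ _ PySem.Dict.nodup_keys_empty, ?_⟩
    intro r
    rw [PySem.Dict.getD_insert]
    simp only [pvB_cwr, List.countP_cons, List.countP_nil]
    by_cases hr : r = 0
    · subst hr
      simp [pvR]
    · simp [pvR, hr, Ne.symm hr]
  have houter := outer_loop g d M k (k - 1).toNat (k - 1) (by omega) (le_refl _) rfl _
    (by rw [show ((k:Int) - 1 - (k - 1)).toNat = 0 by omega,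
          show (k:Int) - 1 + 1 = k by ring]
        exact hInv0)
  have hfin := (houter 0 (le_refl 0) (by omega)).2 (PySem.Int.mod (-1) d)
  rw [← hn, ← hT] at hfin
  rw [hfin]
  ring

-- ===== VERDICT (by name: the statement is the Claim_ definition above) =====
theorem compute_N0_prime_direct_spec : Claim_equal_compute_N0_prime_direct := by
  intro k _ hk
  exact main_eq k hk
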